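-- pv_equiv track=rewrite | github.com/splengy/vjlive3 | scripts/gen_datamosh_plugins.py | make_freq_expr
-- ===== SOURCE A (Python) =====
-- def make_freq_expr(params):
--     candidates = ["insect_crawl", "shockwave_speed", "strobe_speed", "life_speed",
--                   "float_speed", "drip_speed", "orbit_speed", "quality", "block_size"]
--     names = [p[0] for p in params]
--     for c in candidates:
--         if c in names:
--             return f"({c} / 10.0) * 10.0"
--     return "5.0"
-- ===== SOURCE B (Python) =====
-- def make_freq_expr(params):
--     candidates = ["insect_crawl", "shockwave_speed", "strobe_speed", "life_speed",
--                   "float_speed", "drip_speed", "orbit_speed", "quality", "block_size"]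
--     order = {name: i for i, name in enumerate(candidates)}
--     hits = [order[p[0]] for p in params if p[0] in order]
--     if not hits:
--         return "5.0"
--     c = candidates[min(hits)]
--     return f"({c} / 10.0) * 10.0"
-- ===== Notes on version B (the rewrite author's own statement) =====
-- stated objective: alternative
-- what changed: Instead of scanning the candidate list in priority order with a membership test against the param names and returning early, B builds a name-to-priority dict once, makes a single pass over params collecting the priorities that occur, and selects the winning candidate by min.
-- outside the precondition, e.g. on make_freq_expr([[]]): A raises IndexError, B raises IndexError
import Mathlib
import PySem

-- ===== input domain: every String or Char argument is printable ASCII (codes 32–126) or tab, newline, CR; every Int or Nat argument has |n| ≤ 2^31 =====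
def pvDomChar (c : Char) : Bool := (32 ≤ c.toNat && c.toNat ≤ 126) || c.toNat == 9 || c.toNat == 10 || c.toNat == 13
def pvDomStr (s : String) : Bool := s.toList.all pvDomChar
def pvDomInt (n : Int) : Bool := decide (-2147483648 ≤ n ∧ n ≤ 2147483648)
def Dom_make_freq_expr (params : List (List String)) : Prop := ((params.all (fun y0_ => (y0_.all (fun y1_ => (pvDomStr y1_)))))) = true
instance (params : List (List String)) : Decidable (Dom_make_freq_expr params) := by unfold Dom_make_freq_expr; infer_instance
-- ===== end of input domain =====

-- B replaces A's priority-ordered scan of the candidate list (membership test + early return)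
-- by one pass over params through a name→priority dict, selecting the winner with min (objective: alternative).

-- ===== PORT A =====
def aCandidates : List String :=
  ["insect_crawl", "shockwave_speed", "strobe_speed", "life_speed",
   "float_speed", "drip_speed", "orbit_speed", "quality", "block_size"]

-- the 'for c in candidates: if c in names: return …' loop
def aLoop (names : List String) : List String → String
  | [] => "5.0"
  | c :: cs => if names.contains c then "(" ++ c ++ " / 10.0) * 10.0" else aLoop names cs

def make_freq_expr (params : List (List String)) : String :=
  let names := params.map (fun p => (PySem.List.pyGet? p 0).getD "")
  aLoop names aCandidates

-- ===== PORT B =====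
def bCandidates : List String :=
  ["insect_crawl", "shockwave_speed", "strobe_speed", "life_speed",
   "float_speed", "drip_speed", "orbit_speed", "quality", "block_size"]

-- order = {name: i for i, name in enumerate(candidates)}
def bOrder : PySem.Dict String Int :=
  (PySem.List.enumerate bCandidates 0).foldl (fun d iv => d.insert iv.2 iv.1) PySem.Dict.empty

def make_freq_expr_alt (params : List (List String)) : String :=
  -- hits = [order[p[0]] for p in params if p[0] in order]
  let hits := params.filterMap (fun p => bOrder.get? ((PySem.List.pyGet? p 0).getD ""))
  -- if not hits: return "5.0";  c = candidates[min(hits)]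
  match PySem.List.min? hits (fun x => x) with
  | none => "5.0"
  | some m => "(" ++ (PySem.List.pyGet? bCandidates m).getD "" ++ " / 10.0) * 10.0"

-- ===== PRECONDITION & SPEC =====
-- Pre_ excludes params containing an empty inner list, on which A's p[0] raises IndexError (B raises there too).
def Pre_make_freq_expr (params : List (List String)) : Prop := ∀ p ∈ params, p ≠ []
instance (params : List (List String)) : Decidable (Pre_make_freq_expr params) := by unfold Pre_make_freq_expr; infer_instance

def pvWitness_make_freq_expr : List (List String) := [["quality", "0.5"], ["foo"]]

def Spec_make_freq_expr (params : List (List String)) (out : String) : Prop := out = make_freq_expr_alt params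
instance (params : List (List String)) (out : String) : Decidable (Spec_make_freq_expr params out) := by unfold Spec_make_freq_expr; infer_instance

-- ===== CLAIM (what is proved, stated in full; the proofs are below) =====
def Claim_equal_make_freq_expr : Prop := ∀ (params : List (List String)), Dom_make_freq_expr params → Pre_make_freq_expr params → Spec_make_freq_expr params (make_freq_expr params)

-- ===== LEMMAS AND PROOFS =====

-- positional lookup: gFrom cs k n = index of first occurrence of n in cs, offset by k
def gFrom : List String → Int → String → Option Int
  | [], _, _ => none
  | c :: cs, k, n => if c = n then some k else gFrom cs (k + 1) n

theorem gFrom_ge {cs : List String} {k m : Int} {n : String}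
    (h : gFrom cs k n = some m) : k ≤ m := by
  induction cs generalizing k with
  | nil => simp [gFrom] at h
  | cons c cs ih =>
    simp only [gFrom] at h
    split at h
    · injection h with h'
      omega
    · have := ih h; omega

theorem pyGet?_cons_pos {α : Type} (c : α) (cs : List α) (i : Int) (h : 1 ≤ i) :
    PySem.List.pyGet? (c :: cs) i = PySem.List.pyGet? cs (i - 1) := by
  simp only [PySem.List.pyGet?, PySem.List.pyIdx?, List.length_cons]
  split_ifs <;> first
    | rfl
    | omega
    | · have hi : i.toNat = (i - 1).toNat + 1 := by omega
        rw [hi]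
        simp

theorem min?_id_eq {l : List Int} {a : Int} (ha : a ∈ l) (hmin : ∀ x ∈ l, a ≤ x) :
    PySem.List.min? l (fun x => x) = some a := by
  cases h : PySem.List.min? l (fun x => x) with
  | none =>
    rw [PySem.List.min?_eq_none_iff] at h
    subst h; simp at ha
  | some m =>
    have hm : m ∈ l := PySem.List.min?_mem h
    have h1 : m ≤ a := PySem.List.min?_isMin h a ha
    have h2 : a ≤ m := hmin m hm
    rw [le_antisymm h1 h2]

theorem order_get (n : String) : bOrder.get? n = gFrom bCandidates 0 n := by
  have h : bOrder = PySem.Dict.mk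
      [("insect_crawl", 0), ("shockwave_speed", 1), ("strobe_speed", 2), ("life_speed", 3),
       ("float_speed", 4), ("drip_speed", 5), ("orbit_speed", 6), ("quality", 7), ("block_size", 8)] := by
    decide
  rw [h]
  simp only [PySem.Dict.get?_mk_cons, beq_iff_eq, gFrom, bCandidates]
  norm_num
  rfl

theorem loop_min (names : List String) : ∀ (cs : List String) (k : Int),
    aLoop names cs =
      (match PySem.List.min? (names.filterMap (gFrom cs k)) (fun x => x) with
        | none => "5.0"
        | some m => "(" ++ (PySem.List.pyGet? cs (m - k)).getD "" ++ " / 10.0) * 10.0") := by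
  intro cs
  induction cs with
  | nil => intro k; simp [aLoop, gFrom, PySem.List.min?]
  | cons c cs ih =>
    intro k
    by_cases hc : c ∈ names
    · have hmem : k ∈ names.filterMap (gFrom (c :: cs) k) := by
        rw [List.mem_filterMap]
        exact ⟨c, hc, by simp [gFrom]⟩
      have hge : ∀ x ∈ names.filterMap (gFrom (c :: cs) k), k ≤ x := by
        intro x hx
        rw [List.mem_filterMap] at hx
        obtain ⟨n, _, hg⟩ := hx
        exact gFrom_ge hg
      rw [min?_id_eq hmem hge]
      simp [aLoop, hc, PySem.List.pyGet?, PySem.List.pyIdx?]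
    · have hfm : names.filterMap (gFrom (c :: cs) k) = names.filterMap (gFrom cs (k + 1)) := by
        apply List.filterMap_congr
        intro n hn
        have hne : c ≠ n := fun h => hc (h ▸ hn)
        simp [gFrom, hne]
      rw [hfm]
      have hloop : aLoop names (c :: cs) = aLoop names cs := by
        simp [aLoop, hc]
      rw [hloop, ih (k + 1)]
      cases h : PySem.List.min? (names.filterMap (gFrom cs (k + 1))) (fun x => x) with
      | none => rfl
      | some m =>
        have hm : m ∈ names.filterMap (gFrom cs (k + 1)) := PySem.List.min?_mem h
        rw [List.mem_filterMap] at hm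
        obtain ⟨n, _, hg⟩ := hm
        have hge : k + 1 ≤ m := gFrom_ge hg
        dsimp only
        rw [pyGet?_cons_pos c cs (m - k) (by omega)]
        have he : m - k - 1 = m - (k + 1) := by ring
        rw [he]

-- ===== VERDICT (by name: the statement is the Claim_ definition above) =====
theorem make_freq_expr_spec : Claim_equal_make_freq_expr := by
  intro params _ _
  unfold Spec_make_freq_expr make_freq_expr make_freq_expr_alt
  have hhits : params.filterMap (fun p => bOrder.get? ((PySem.List.pyGet? p 0).getD "")) =
      (params.map (fun p => (PySem.List.pyGet? p 0).getD "")).filterMap (gFrom bCandidates 0) := by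
    rw [List.filterMap_map]
    apply List.filterMap_congr
    intro p _
    exact order_get _
  rw [hhits]
  have := loop_min (params.map (fun p => (PySem.List.pyGet? p 0).getD "")) bCandidates 0
  simp only [sub_zero] at this
  exact this
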